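-- pv_equiv track=rewrite | github.com/Kovacspls/Daily-Code-Challanges | coding_challange4.py | formatted_list
-- ===== SOURCE A (Python) =====
-- def formatted_list(formatable_list):
-- 	'''
-- 	This function takes and arbitrary list, and creates a new list from it without negative numbers and 0
-- 	At the end of the list the value of the counter variable appended
--
-- 	'''
-- 	formatted_list = []
-- 	counter = 0
-- 	for element in formatable_list:
-- 		if element > 0 and element not in formatted_list:
-- 			formatted_list.append(element)
-- 		if element <= 0 or element in formatted_list:
-- 			counter += 1
--
-- 	my_val = sorted(formatted_list)
-- 	my_val.append(counter)
--
-- 	return my_val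
-- ===== SOURCE B (Python) =====
-- def formatted_list(formatable_list):
--     out = []
--     for x in sorted(formatable_list):
--         if x > 0 and (not out or out[-1] != x):
--             out.append(x)
--     out.append(len(formatable_list))
--     return out
-- ===== Notes on version B (the rewrite author's own statement) =====
-- stated objective: faster
-- what changed: A dedups by list-membership during its scan and bumps a counter that in fact fires on every element; B sorts FIRST, makes one adjacent-duplicate-skipping scan over the sorted list (out[-1] comparison), and appends the closed-form len(formatable_list) instead of the counter.
import Mathlib
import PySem

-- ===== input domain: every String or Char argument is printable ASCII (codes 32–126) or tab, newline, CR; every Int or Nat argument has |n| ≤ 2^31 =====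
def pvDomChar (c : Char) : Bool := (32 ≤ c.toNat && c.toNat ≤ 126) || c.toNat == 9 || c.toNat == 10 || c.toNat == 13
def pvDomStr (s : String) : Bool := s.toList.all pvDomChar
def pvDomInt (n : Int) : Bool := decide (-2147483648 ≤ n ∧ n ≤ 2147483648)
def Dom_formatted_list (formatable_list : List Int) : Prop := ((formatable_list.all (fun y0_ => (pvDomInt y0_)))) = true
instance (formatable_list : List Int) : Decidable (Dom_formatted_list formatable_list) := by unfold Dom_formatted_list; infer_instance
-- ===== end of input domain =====

-- B sorts first and skips adjacent duplicates in one scan (A dedups by list membership while scanning), appending len(list) for A's always-firing counter; equivalence proved below.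

-- ===== PORT A =====
def formatted_list (formatable_list : List Int) : List Int :=
  let st := formatable_list.foldl
    (fun (st : List Int × Int) element =>
      let lst := if element > 0 ∧ element ∉ st.1 then st.1 ++ [element] else st.1
      let counter := if element ≤ 0 ∨ element ∈ lst then st.2 + 1 else st.2
      (lst, counter))
    ([], 0)
  PySem.List.sorted st.1 (fun x => x) false ++ [st.2]

-- ===== PORT B =====
def formatted_list_alt (formatable_list : List Int) : List Int :=
  let out := (PySem.List.sorted formatable_list (fun x => x) false).foldl
    (fun (out : List Int) x =>
      if 0 < x ∧ (out = [] ∨ out.getLast? ≠ some x) then out ++ [x] else out) []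
  out ++ [(formatable_list.length : Int)]

-- ===== PRECONDITION & SPEC =====
def Spec_formatted_list (formatable_list : List Int) (out : List Int) : Prop := out = formatted_list_alt formatable_list
instance (formatable_list : List Int) (out : List Int) : Decidable (Spec_formatted_list formatable_list out) := by unfold Spec_formatted_list; infer_instance

-- ===== CLAIM =====
def Claim_equal_formatted_list : Prop := ∀ (formatable_list : List Int), Dom_formatted_list formatable_list → Spec_formatted_list formatable_list (formatted_list formatable_list)

-- ===== LEMMAS AND PROOFS =====

-- A's loop invariant: the list is the Set.add-fold of the positive elements and the counter counts everything.
theorem formatted_list_foldl_inv (xs : List Int) (acc : List Int) (c : Int) :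
    xs.foldl
      (fun (st : List Int × Int) element =>
        let lst := if element > 0 ∧ element ∉ st.1 then st.1 ++ [element] else st.1
        let counter := if element ≤ 0 ∨ element ∈ lst then st.2 + 1 else st.2
        (lst, counter))
      (acc, c)
    = ((xs.filter (fun x => x > 0)).foldl PySem.Set.add acc, c + xs.length) := by
  induction xs generalizing acc c with
  | nil => simp
  | cons e t ih =>
    simp only [List.foldl_cons, List.filter_cons]
    by_cases hpos : e > 0
    · have hadd : (if e > 0 ∧ e ∉ acc then acc ++ [e] else acc) = PySem.Set.add acc e := by
        simp [PySem.Set.add, PySem.Set.contains, hpos]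
      have hmem : e ∈ PySem.Set.add acc e := by
        simp [PySem.Set.mem_add]
      simp only [hadd]
      have hc : (if e ≤ 0 ∨ e ∈ PySem.Set.add acc e then c + 1 else c) = c + 1 := by
        simp [hmem]
      rw [hc, ih]
      simp [hpos]
      ring
    · have h1 : ¬ (e > 0 ∧ e ∉ acc) := by tauto
      have hle : e ≤ 0 := by omega
      simp only [if_neg h1, if_pos (Or.inl hle)]
      rw [ih]
      simp [hpos]
      ring

-- In a strictly increasing list, a member that dominates every element is the last element.
theorem getLast?_eq_of_mem_max (l : List Int) (x : Int)
    (hp : l.Pairwise (· < ·)) (hx : x ∈ l) (hmax : ∀ a ∈ l, a ≤ x) :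
    l.getLast? = some x := by
  induction l with
  | nil => cases hx
  | cons a t ih =>
    cases t with
    | nil => simp at hx; simp [hx]
    | cons b u =>
      have hpt : (b :: u).Pairwise (· < ·) := (List.pairwise_cons.mp hp).2
      have hforall : ∀ y ∈ b :: u, a < y := (List.pairwise_cons.mp hp).1
      have hxt : x ∈ b :: u := by
        rcases List.mem_cons.mp hx with h | h
        · exfalso
          have hb : a < b := hforall b (by simp)
          have hbx : b ≤ x := hmax b (by simp)
          omega
        · exact h
      have : (b :: u).getLast? = some x :=
        ih hpt hxt (fun a ha => hmax a (List.mem_cons_of_mem _ ha))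
      simpa [List.getLast?_cons_cons] using this

-- B's scan invariant over a ≤-sorted list: starting from a strictly increasing, positive
-- accumulator dominated by the remaining input, the scan produces a strictly increasing list
-- containing exactly the accumulator plus the positive elements of the input.
theorem bfold_inv (ys : List Int) (acc : List Int)
    (hys : ys.Pairwise (· ≤ ·))
    (hacc : acc.Pairwise (· < ·))
    (hle : ∀ a ∈ acc, ∀ y ∈ ys, a ≤ y) :
    (ys.foldl (fun (out : List Int) x =>
        if 0 < x ∧ (out = [] ∨ out.getLast? ≠ some x) then out ++ [x] else out) acc).Pairwise (· < ·)
    ∧ ∀ r, r ∈ ys.foldl (fun (out : List Int) x =>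
        if 0 < x ∧ (out = [] ∨ out.getLast? ≠ some x) then out ++ [x] else out) acc
        ↔ (r ∈ acc ∨ (r ∈ ys ∧ 0 < r)) := by
  induction ys generalizing acc with
  | nil => simpa using hacc
  | cons e t ih =>
    have hhead : ∀ y ∈ t, e ≤ y := fun y hy => (List.pairwise_cons.mp hys).1 y hy
    have hpt : t.Pairwise (· ≤ ·) := (List.pairwise_cons.mp hys).2
    simp only [List.foldl_cons]
    by_cases hpos : 0 < e
    · by_cases hin : e ∈ acc
      · have hlast : acc.getLast? = some e :=
          getLast?_eq_of_mem_max acc e hacc hin (fun a ha => hle a ha e (by simp))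
        have hne : acc ≠ [] := by intro h; subst h; cases hin
        have hcond : ¬ (0 < e ∧ (acc = [] ∨ acc.getLast? ≠ some e)) := by
          simp [hlast, hne]
        rw [if_neg hcond]
        obtain ⟨h1, h2⟩ := ih acc hpt hacc
          (fun a ha y hy => hle a ha y (List.mem_cons_of_mem _ hy))
        refine ⟨h1, fun r => ?_⟩
        rw [h2]
        constructor
        · rintro (h | ⟨h, hr⟩)
          · exact Or.inl h
          · exact Or.inr ⟨List.mem_cons_of_mem _ h, hr⟩
        · rintro (h | ⟨h, hr⟩)
          · exact Or.inl h
          · rcases List.mem_cons.mp h with h | h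
            · subst h; exact Or.inl hin
            · exact Or.inr ⟨h, hr⟩
      · have hcond : (0 < e ∧ (acc = [] ∨ acc.getLast? ≠ some e)) := by
          refine ⟨hpos, ?_⟩
          cases acc with
          | nil => exact Or.inl rfl
          | cons a u =>
            refine Or.inr ?_
            intro h
            exact hin (List.mem_of_getLast? h)
        rw [if_pos hcond]
        have hacc' : (acc ++ [e]).Pairwise (· < ·) := by
          rw [List.pairwise_append]
          refine ⟨hacc, by simp, ?_⟩
          intro a ha z hz
          have hz' : z = e := by simpa using hz
          rw [hz']
          have hax : a ≤ e := hle a ha e (by simp)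
          rcases lt_or_eq_of_le hax with h | h
          · exact h
          · exact absurd (h ▸ ha) hin
        have hle' : ∀ a ∈ acc ++ [e], ∀ y ∈ t, a ≤ y := by
          intro a ha y hy
          rcases List.mem_append.mp ha with h | h
          · exact hle a h y (List.mem_cons_of_mem _ hy)
          · simp at h; subst h; exact hhead y hy
        obtain ⟨h1, h2⟩ := ih (acc ++ [e]) hpt hacc' hle'
        refine ⟨h1, fun r => ?_⟩
        rw [h2]
        constructor
        · rintro (h | ⟨h, hr⟩)
          · rcases List.mem_append.mp h with h | h
            · exact Or.inl h
            · simp at h; subst h; exact Or.inr ⟨by simp, hpos⟩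
          · exact Or.inr ⟨List.mem_cons_of_mem _ h, hr⟩
        · rintro (h | ⟨h, hr⟩)
          · exact Or.inl (List.mem_append_left _ h)
          · rcases List.mem_cons.mp h with h | h
            · subst h; exact Or.inl (by simp)
            · exact Or.inr ⟨h, hr⟩
    · have hcond : ¬ (0 < e ∧ (acc = [] ∨ acc.getLast? ≠ some e)) := by tauto
      rw [if_neg hcond]
      obtain ⟨h1, h2⟩ := ih acc hpt hacc
        (fun a ha y hy => hle a ha y (List.mem_cons_of_mem _ hy))
      refine ⟨h1, fun r => ?_⟩
      rw [h2]
      constructor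
      · rintro (h | ⟨h, hr⟩)
        · exact Or.inl h
        · exact Or.inr ⟨List.mem_cons_of_mem _ h, hr⟩
      · rintro (h | ⟨h, hr⟩)
        · exact Or.inl h
        · rcases List.mem_cons.mp h with h | h
          · subst h; omega
          · exact Or.inr ⟨h, hr⟩

theorem formatted_list_spec : Claim_equal_formatted_list := by
  intro xs _
  unfold Spec_formatted_list formatted_list formatted_list_alt
  simp only [formatted_list_foldl_inv, ← PySem.Set.ofList_eq_foldl]
  have hsorted : (PySem.List.sorted xs (fun x => x) false).Pairwise (· ≤ ·) := by
    simpa using PySem.List.sorted_pairwise xs (fun x => x)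
  obtain ⟨hpw, hmem⟩ := bfold_inv (PySem.List.sorted xs (fun x => x) false) [] hsorted
    (by simp) (by simp)
  set R := (PySem.List.sorted xs (fun x => x) false).foldl
    (fun (out : List Int) x =>
      if 0 < x ∧ (out = [] ∨ out.getLast? ≠ some x) then out ++ [x] else out) [] with hR
  have hmem' : ∀ r, r ∈ R ↔ r ∈ PySem.Set.ofList (xs.filter (fun x => x > 0)) := by
    intro r
    rw [hmem r, PySem.Set.mem_ofList]
    simp [PySem.List.mem_sorted]
  have hRnodup : R.Nodup := hpw.imp (fun h => ne_of_lt h)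
  have hSnodup : (PySem.Set.ofList (xs.filter (fun x => x > 0))).Nodup :=
    PySem.Set.nodup_ofList _
  have hperm : R.Perm (PySem.Set.ofList (xs.filter (fun x => x > 0))) :=
    (List.perm_ext_iff_of_nodup hRnodup hSnodup).mpr hmem'
  have := PySem.List.sorted_eq_of_perm_of_pairwise_lt (key := fun x => x)
    (xs := PySem.Set.ofList (xs.filter (fun x => x > 0))) (ys := R) hperm (by simpa using hpw)
  rw [this]
  norm_num
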